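-- pv_equiv track=rewrite | github.com/jonathan2406/A-D_ShinobiDelCodigo | taller 5/punto2.py | min_operaciones_para_N
-- ===== SOURCE A (Python) =====
-- def min_operaciones_para_N(N):
--     operaciones = 0
--     while N > 0:
--         if N % 2 == 0:
--             N //= 2
--         else:
--             N -= 1
--         operaciones += 1
--     return operaciones
-- ===== SOURCE B (Python) =====
-- def min_operaciones_para_N(N):
--     if N < 1:
--         return 0
--     return (N.bit_length() - 1) + bin(N).count('1')
-- ===== Notes on version B (the rewrite author's own statement) =====
-- stated objective: faster
-- what changed: Replaced the halve/decrement simulation loop by a closed form read off N's binary representation: (bit_length-1) halvings plus popcount decrements.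
import Mathlib
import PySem

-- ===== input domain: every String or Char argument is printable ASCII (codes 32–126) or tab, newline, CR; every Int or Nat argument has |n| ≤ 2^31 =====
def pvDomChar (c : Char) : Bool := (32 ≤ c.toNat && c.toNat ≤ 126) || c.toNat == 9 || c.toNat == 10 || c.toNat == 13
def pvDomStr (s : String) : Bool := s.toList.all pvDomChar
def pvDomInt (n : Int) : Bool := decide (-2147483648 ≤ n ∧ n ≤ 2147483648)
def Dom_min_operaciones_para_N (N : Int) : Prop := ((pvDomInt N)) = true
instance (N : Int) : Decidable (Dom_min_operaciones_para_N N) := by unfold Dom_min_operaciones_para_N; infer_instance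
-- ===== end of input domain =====

-- B replaces A's halve/decrement loop by a closed form on N's binary representation (bit_length - 1 halvings + popcount decrements).

-- ===== PORT A =====
-- the while loop of A, with its accumulator 'operaciones'
def minOpsLoop (N : Int) (operaciones : Int) : Int :=
  if N > 0 then
    if PySem.Int.mod N 2 = 0 then
      minOpsLoop (PySem.Int.floordiv N 2) (operaciones + 1)
    else
      minOpsLoop (N - 1) (operaciones + 1)
  else operaciones
termination_by N.toNat
decreasing_by
  · rw [PySem.Int.floordiv_eq_ediv_of_pos (by omega)]; omega
  · omega

def min_operaciones_para_N (N : Int) : Int := minOpsLoop N 0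

-- ===== PORT B =====
def min_operaciones_para_N_alt (N : Int) : Int :=
  if N < 1 then 0
  else ((PySem.Int.bitLength N - 1 : Nat) : Int) + ((PySem.Int.bitCount N : Nat) : Int)

-- ===== PRECONDITION & SPEC =====
def Spec_min_operaciones_para_N (N : Int) (out : Int) : Prop := out = min_operaciones_para_N_alt N
instance (N : Int) (out : Int) : Decidable (Spec_min_operaciones_para_N N out) := by unfold Spec_min_operaciones_para_N; infer_instance

-- ===== CLAIM (what is proved, stated in full; the proofs are below) =====
def Claim_equal_min_operaciones_para_N : Prop := ∀ (N : Int), Dom_min_operaciones_para_N N → Spec_min_operaciones_para_N N (min_operaciones_para_N N)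

-- ===== LEMMAS AND PROOFS =====

lemma bitLength_pos {N : Int} (h : 0 < N) : 0 < PySem.Int.bitLength N := by
  by_contra hc
  have h0 : PySem.Int.bitLength N = 0 := by omega
  have := PySem.Int.lt_two_pow_bitLength N
  rw [h0] at this
  simp at this
  omega

lemma alt_closed {N : Int} (h : 0 < N) :
    min_operaciones_para_N_alt N
      = (PySem.Int.bitLength N : Int) - 1 + (PySem.Int.bitCount N : Int) := by
  have hb := bitLength_pos h
  simp only [min_operaciones_para_N_alt, if_neg (by omega : ¬ N < 1)]
  push_cast [Nat.cast_sub hb]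
  ring

lemma alt_nonpos {N : Int} (h : ¬ N > 0) : min_operaciones_para_N_alt N = 0 := by
  simp [min_operaciones_para_N_alt, if_pos (by omega : N < 1)]

lemma alt_even {N : Int} (h : 0 < N) (he : PySem.Int.mod N 2 = 0) :
    min_operaciones_para_N_alt N
      = min_operaciones_para_N_alt (PySem.Int.floordiv N 2) + 1 := by
  have h2 : (2 : Int) ∣ N := (PySem.Int.mod_eq_zero_iff_dvd N 2).mp he
  have hN2 : 0 < PySem.Int.floordiv N 2 := by
    rw [PySem.Int.floordiv_eq_ediv_of_pos (by omega)]; omega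
  rw [alt_closed h, alt_closed hN2,
    PySem.Int.bitLength_of_pos h, PySem.Int.bitCount_of_pos h, he]
  have hb := bitLength_pos hN2
  push_cast
  ring

lemma alt_odd {N : Int} (h : 0 < N) (ho : ¬ PySem.Int.mod N 2 = 0) :
    min_operaciones_para_N_alt N = min_operaciones_para_N_alt (N - 1) + 1 := by
  have hmod : PySem.Int.mod N 2 = 1 := by
    rcases PySem.Int.mod_two_eq N with h' | h' <;> simp_all
  by_cases h1 : N = 1
  · subst h1
    rw [alt_closed (by omega), alt_nonpos (by omega)]
    decide
  · -- N odd, N ≥ 3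
    have h3 : 3 ≤ N := by
      by_contra hc
      interval_cases N <;> simp_all
    have hN1 : 0 < N - 1 := by omega
    have hmod1 : PySem.Int.mod (N - 1) 2 = 0 := by
      rw [PySem.Int.mod_eq_emod_of_pos (by omega)] at hmod ⊢
      omega
    have hfd : PySem.Int.floordiv (N - 1) 2 = PySem.Int.floordiv N 2 := by
      rw [PySem.Int.floordiv_eq_ediv_of_pos (a := N - 1) (by omega),
          PySem.Int.floordiv_eq_ediv_of_pos (a := N) (by omega)]
      rw [PySem.Int.mod_eq_emod_of_pos (by omega)] at hmod
      omega
    have hN2 : 0 < PySem.Int.floordiv N 2 := by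
      rw [PySem.Int.floordiv_eq_ediv_of_pos (by omega)]; omega
    rw [alt_closed h, alt_closed hN1,
      PySem.Int.bitLength_of_pos h, PySem.Int.bitCount_of_pos h,
      PySem.Int.bitLength_of_pos hN1, PySem.Int.bitCount_of_pos hN1,
      hfd, hmod, hmod1]
    push_cast
    ring

lemma loop_closed (N operaciones : Int) :
    minOpsLoop N operaciones = operaciones + min_operaciones_para_N_alt N := by
  fun_induction minOpsLoop N operaciones with
  | case1 N ops hpos he ih => rw [ih, alt_even hpos he]; ring
  | case2 N ops hpos ho ih => rw [ih, alt_odd hpos ho]; ring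
  | case3 N ops hpos => rw [alt_nonpos hpos]; ring

-- ===== VERDICT (by name: the statement is the Claim_ definition above) =====
theorem min_operaciones_para_N_spec : Claim_equal_min_operaciones_para_N := by
  intro N _
  unfold Spec_min_operaciones_para_N min_operaciones_para_N
  rw [loop_closed, zero_add]
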